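-- pv_equiv track=rewrite | github.com/Movazed/CodeForces_Problem_Set | hooldings.py | getMaxEarnings
-- ===== SOURCE A (Python) =====
-- def getMaxEarnings(schedule, k, fixedPay, bonus):
--     n = len(schedule)
--     zeros_total = schedule.count('0')
--     ones = n - zeros_total
--
--     # If there are no workdays initially
--     if ones == 0:
--         used = min(k, n)
--         if used == 0:
--             return 0
--         # One run if we flip at least one day
--         return fixedPay * used + bonus * (used - 1)
--
--     # Count runs of '1' and collect lengths of internal zero gaps
--     gaps = []
--     runs = 0
--     i = 0
--     while i < n:
--         if schedule[i] == '1':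
--             runs += 1
--             while i < n and schedule[i] == '1':
--                 i += 1
--         else:
--             l = i
--             while i < n and schedule[i] == '0':
--                 i += 1
--             r = i
--             # Internal gap if bounded by '1' on both sides
--             if l > 0 and r < n and schedule[l - 1] == '1' and schedule[r] == '1':
--                 gaps.append(r - l)
--
--     # Use flips: first fill smallest internal gaps to merge runs
--     k_use = min(k, zeros_total)
--     merges = 0
--     used = 0
--     gaps.sort()
--     for g in gaps:
--         if k_use >= g:
--             k_use -= g
--             used += g
--             merges += 1
--         else:
--             break
--
--     # Use remaining flips to extend runs (no further change to run count)
--     used += min(k_use, zeros_total - used)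
--
--     newOnes = ones + used
--     newRuns = runs - merges
--
--     # Earnings = fixedPay * totalOnes + bonus * (ones that have a previous day worked)
--     return fixedPay * newOnes + bonus * (newOnes - newRuns)
-- ===== SOURCE B (Python) =====
-- def getMaxEarnings(schedule, k, fixedPay, bonus):
--     n = len(schedule)
--     zeros_total = schedule.count('0')
--     ones = n - zeros_total
--     if ones == 0:
--         u = min(k, n)
--         return 0 if u == 0 else fixedPay * u + bonus * (u - 1)
--
--     # One flat left-to-right state machine over the characters (no nested
--     # while loops, no gap list, no sort): cnt is a frequency table of the
--     # internal zero-gap lengths, g the length of the current zero run, b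
--     # whether the character before the current zero run was '1'.
--     cnt = {}
--     runs = 0
--     g = 0
--     b = False
--     for c in schedule:
--         if c == '1':
--             if g and b:
--                 cnt[g] = cnt.get(g, 0) + 1
--             if g or not b:
--                 runs += 1
--             g = 0
--             b = True
--         else:
--             g += 1
--
--     # Greedy merge, smallest gaps first, consuming whole buckets at a time.
--     budget = min(k, zeros_total)
--     merges = 0
--     for length in range(1, n + 1):
--         c = cnt.get(length, 0)
--         if c == 0:
--             continue
--         if budget < length:
--             break
--         t = min(c, budget // length)
--         merges += t
--         budget -= t * length
--         if t < c:
--             break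
--
--     # All of min(k, zeros_total) flips get spent (merging or extending).
--     newOnes = ones + min(k, zeros_total)
--     newRuns = runs - merges
--     return fixedPay * newOnes + bonus * (newOnes - newRuns)
-- ===== Notes on version B (the rewrite author's own statement) =====
-- stated objective: alternative
-- what changed: Replaces A's nested-while scan that builds and sorts a gap list and its greedy prefix walk with two-phase 'used' accumulation by a single flat state-machine pass filling a frequency table of gap lengths, an ascending bucket walk consuming whole buckets with one division each, and the closed form used = min(k, zeros_total).
import Mathlib
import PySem

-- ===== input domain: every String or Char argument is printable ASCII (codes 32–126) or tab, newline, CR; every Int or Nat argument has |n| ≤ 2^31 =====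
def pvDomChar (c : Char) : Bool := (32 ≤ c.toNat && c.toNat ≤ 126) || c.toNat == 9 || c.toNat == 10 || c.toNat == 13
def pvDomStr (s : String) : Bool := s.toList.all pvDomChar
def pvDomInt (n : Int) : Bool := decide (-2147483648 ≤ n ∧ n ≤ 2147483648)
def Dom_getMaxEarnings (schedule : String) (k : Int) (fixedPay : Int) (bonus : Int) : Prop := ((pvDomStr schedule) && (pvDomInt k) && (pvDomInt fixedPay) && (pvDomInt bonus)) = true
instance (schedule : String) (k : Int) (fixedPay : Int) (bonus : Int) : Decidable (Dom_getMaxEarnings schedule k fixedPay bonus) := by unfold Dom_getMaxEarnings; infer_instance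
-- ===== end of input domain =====

-- B replaces A's nested-while scan + sorted gap list + greedy prefix walk (with its
-- two-phase `used` accumulation) by one flat state-machine pass filling a frequency
-- table of gap lengths, an ascending bucket walk over that table, and the closed
-- form used = min(k, zeros_total); objective: alternative algorithm.

-- ===== PORT A =====
-- A's index-based while scan, rendered as structural recursion on the remaining
-- characters; the Bool flag records whether the character just before the current
-- position is '1' (A's `l > 0 and schedule[l-1] == '1'` test).  On a character that
-- is neither '0' nor '1' Python A loops forever (i never advances), so it has no
-- value there; those schedules are excluded by Pre_ below, the port steps past the
-- character.
def scanA : List Char → Bool → (List Int × Int)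
  | [], _ => ([], 0)
  | c :: rest, prev1 =>
    if c = '1' then
      -- inner while consuming the run of '1'
      let res := scanA (rest.dropWhile (· = '1')) true
      (res.1, res.2 + 1)
    else
      if hc : c = '0' then
        let zs := (c :: rest).takeWhile (· = '0')   -- the zero run (nonempty since c = '0')
        let rest' := (c :: rest).dropWhile (· = '0')
        let internal := prev1 && (rest'.head? == some '1')
        let res := scanA rest' false
        (if internal then (zs.length : Int) :: res.1 else res.1, res.2)
      else
        scanA rest prev1      -- Python A diverges here (outside Pre_)
termination_by L _ => L.length
decreasing_by
  · simpa using Nat.lt_succ_of_le (List.length_dropWhile_le (· = '1') rest)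
  · simp only [List.dropWhile_cons, hc, decide_true, if_true]
    simpa using Nat.lt_succ_of_le (List.length_dropWhile_le (· = '0') rest)
  · simp

-- A's greedy loop over the sorted gaps: state (k_use, merges, used), break = return
def gloop : List Int → Int → Int → Int → Int × Int × Int
  | [], kUse, merges, used => (kUse, merges, used)
  | g :: gs, kUse, merges, used =>
    if kUse ≥ g then gloop gs (kUse - g) (merges + 1) (used + g)
    else (kUse, merges, used)

def getMaxEarnings (schedule : String) (k : Int) (fixedPay : Int) (bonus : Int) : Int :=
  let L := schedule.toList
  let n : Int := L.length
  let zerosTotal : Int := L.count '0'   -- schedule.count('0'): 1-char substring count = char count (exact)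
  let ones := n - zerosTotal
  if ones = 0 then
    let used := min k n
    if used = 0 then 0
    else fixedPay * used + bonus * (used - 1)
  else
    let sr := scanA L false
    let kUse := min k zerosTotal
    let sortedGaps := PySem.List.sorted sr.1 (fun x => x) false   -- gaps.sort()
    let res := gloop sortedGaps kUse 0 0
    let used := res.2.2 + min res.1 (zerosTotal - res.2.2)
    let newOnes := ones + used
    let newRuns := sr.2 - res.2.1
    fixedPay * newOnes + bonus * (newOnes - newRuns)

-- ===== PORT B =====
-- B's flat state machine, one step per character: state (cnt, runs, g, b) where cnt
-- is the frequency table of internal zero-gap lengths, g the length of the current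
-- zero run and b whether the character before the current zero run was '1'.
def stepB (st : PySem.Dict Int Int × Int × Int × Bool) (c : Char) :
    PySem.Dict Int Int × Int × Int × Bool :=
  if c = '1' then
    ((if st.2.2.1 ≠ 0 ∧ st.2.2.2 = true then st.1.modify st.2.2.1 0 (· + 1) else st.1),
     (if st.2.2.1 ≠ 0 ∨ st.2.2.2 ≠ true then st.2.1 + 1 else st.2.1), 0, true)
  else
    (st.1, st.2.1, st.2.2.1 + 1, st.2.2.2)

-- B's bucket walk: for length in range(1, n+1), consume whole buckets, break = return
def bloop (cnt : PySem.Dict Int Int) : List Int → Int → Int → Int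
  | [], _, merges => merges
  | len :: rest, budget, merges =>
    let c := cnt.getD len 0
    if c = 0 then bloop cnt rest budget merges
    else if budget < len then merges
    else
      let t := min c (PySem.Int.floordiv budget len)
      if t < c then merges + t
      else bloop cnt rest (budget - t * len) (merges + t)

def getMaxEarnings_alt (schedule : String) (k : Int) (fixedPay : Int) (bonus : Int) : Int :=
  let L := schedule.toList
  let n : Int := L.length
  let zerosTotal : Int := L.count '0'
  let ones := n - zerosTotal
  if ones = 0 then
    let u := min k n
    if u = 0 then 0 else fixedPay * u + bonus * (u - 1)
  else
    let st := L.foldl stepB (PySem.Dict.empty, 0, 0, false)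
    let merges := bloop st.1 (PySem.List.pyRange 1 (n + 1) 1) (min k zerosTotal) 0
    let newOnes := ones + min k zerosTotal
    let newRuns := st.2.1 - merges
    fixedPay * newOnes + bonus * (newOnes - newRuns)

-- ===== PRECONDITION & SPEC =====
-- Python A's outer while loop never advances past a character other than '0'/'1'
-- (whenever the schedule contains a '1'), so A diverges on every non-binary
-- schedule and returns exactly on the schedules admitted here (an all-'0'
-- schedule is binary, so no input A returns on is excluded).
def Pre_getMaxEarnings (schedule : String) (k : Int) (fixedPay : Int) (bonus : Int) : Prop :=
  schedule.toList.all (fun c => c == '0' || c == '1') = true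
instance (schedule : String) (k : Int) (fixedPay : Int) (bonus : Int) : Decidable (Pre_getMaxEarnings schedule k fixedPay bonus) := by unfold Pre_getMaxEarnings; infer_instance

def pvWitness_getMaxEarnings : String × Int × Int × Int := ("0110100", 3, 5, 2)

def Spec_getMaxEarnings (schedule : String) (k : Int) (fixedPay : Int) (bonus : Int) (out : Int) : Prop := out = getMaxEarnings_alt schedule k fixedPay bonus
instance (schedule : String) (k : Int) (fixedPay : Int) (bonus : Int) (out : Int) : Decidable (Spec_getMaxEarnings schedule k fixedPay bonus out) := by unfold Spec_getMaxEarnings; infer_instance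

-- ===== CLAIM (what is proved, stated in full; the proofs are below) =====
def Claim_equal_getMaxEarnings : Prop := ∀ (schedule : String) (k : Int) (fixedPay : Int) (bonus : Int), Dom_getMaxEarnings schedule k fixedPay bonus → Pre_getMaxEarnings schedule k fixedPay bonus → Spec_getMaxEarnings schedule k fixedPay bonus (getMaxEarnings schedule k fixedPay bonus)

-- ===== LEMMAS AND PROOFS =====

-- the head of a dropWhile never satisfies the predicate
theorem head?_dropWhile_ne (p : Char → Bool) :
    ∀ (l : List Char) (x : Char), (l.dropWhile p).head? = some x → p x = false := by
  intro l
  induction l with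
  | nil => intro x h; simp at h
  | cons c t ih =>
      intro x h
      rw [List.dropWhile_cons] at h
      by_cases hp : p c
      · rw [if_pos hp] at h; exact ih x h
      · rw [if_neg hp] at h
        simp at h
        subst h
        simpa using hp

-- folding B's step over a run of '1' from state (d, r, 0, true) is the identity
theorem foldB_ones (zs : List Char) (h : ∀ c ∈ zs, c = '1') (d : PySem.Dict Int Int) (r : Int) :
    zs.foldl stepB (d, r, 0, true) = (d, r, 0, true) := by
  induction zs with
  | nil => rfl
  | cons c t ih =>
      have hc : c = '1' := h c (by simp)
      simp only [List.foldl_cons, stepB, hc]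
      simpa using ih (fun c hc => h c (by simp [hc]))

-- folding B's step over zeros just accumulates the run length
theorem foldB_zeros (zs : List Char) (h : ∀ c ∈ zs, c ≠ '1') :
    ∀ (d : PySem.Dict Int Int) (r g : Int) (b : Bool),
      zs.foldl stepB (d, r, g, b) = (d, r, g + zs.length, b) := by
  induction zs with
  | nil => intro d r g b; simp
  | cons c t ih =>
      intro d r g b
      have hc : c ≠ '1' := h c (by simp)
      simp only [List.foldl_cons, stepB, if_neg hc]
      rw [ih (fun c hc => h c (by simp [hc])) d r (g + 1) b]
      simp only [List.length_cons]
      have hcast : g + 1 + (t.length : Int) = g + (((t.length + 1 : Nat)) : Int) := by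
        push_cast; ring
      rw [hcast]

-- the pending zero run is flushed when the fold resumes on [] or a '1'-headed list
theorem foldB_hop (rest : List Char) (hhd : rest.head? ≠ some '0')
    (hbin : ∀ c ∈ rest, c = '0' ∨ c = '1') (d : PySem.Dict Int Int) (r g : Int) (b : Bool)
    (hg : g ≠ 0) :
    (rest.foldl stepB (d, r, g, b)).1
        = (rest.foldl stepB
            ((if b && (rest.head? == some '1') then d.modify g 0 (· + 1) else d),
              r, 0, false)).1
      ∧ (rest.foldl stepB (d, r, g, b)).2.1
        = (rest.foldl stepB
            ((if b && (rest.head? == some '1') then d.modify g 0 (· + 1) else d),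
              r, 0, false)).2.1 := by
  cases rest with
  | nil => cases b <;> simp
  | cons c t =>
      have hc : c = '1' := by
        rcases hbin c (by simp) with h0 | h1
        · exact absurd (by simp [h0]) hhd
        · exact h1
      subst hc
      simp only [List.head?_cons, List.foldl_cons, stepB, if_pos rfl]
      cases b <;> simp [hg]

-- B's fold computes A's gap multiset (as a running counter) and A's run count.
-- Flag hypothesis: scanA is only entered with flag true when the list does not
-- start with '1' (true right after an exhausted '1' run).
theorem foldB_eq (L : List Char) (p : Bool) (hbin : ∀ c ∈ L, c = '0' ∨ c = '1')
    (hp : p = true → L.head? ≠ some '1') :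
    ∀ (d : PySem.Dict Int Int) (r : Int),
      (L.foldl stepB (d, r, 0, p)).1
          = ((scanA L p).1).foldl (fun d g => d.modify g 0 (· + 1)) d
        ∧ (L.foldl stepB (d, r, 0, p)).2.1 = r + (scanA L p).2 := by
  induction L, p using scanA.induct with
  | case1 p => intro d r; simp [scanA]
  | case2 rest prev1 ih =>
      intro d r
      have hp1 : prev1 = false := by
        cases prev1
        · rfl
        · exact absurd (by simp) (hp rfl)
      subst hp1
      have hbin' : ∀ c ∈ rest.dropWhile (· = '1'), c = '0' ∨ c = '1' := by
        intro c hc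
        exact hbin c (List.mem_cons_of_mem _ ((List.dropWhile_sublist _).mem hc))
      have hhd : (true = true) → (rest.dropWhile (· = '1')).head? ≠ some '1' := by
        intro _ h
        have := head?_dropWhile_ne (· = '1') rest '1' h
        simp at this
      have hones : ∀ c ∈ rest.takeWhile (· = '1'), c = '1' := by
        intro c hc
        simpa using List.mem_takeWhile_imp hc
      have hfold : List.foldl stepB (d, r, 0, false) ('1' :: rest)
          = List.foldl stepB (d, r + 1, 0, true) (rest.dropWhile (· = '1')) := by
        conv_lhs => rw [show ('1' :: rest)
            = '1' :: (rest.takeWhile (· = '1') ++ rest.dropWhile (· = '1')) by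
          rw [List.takeWhile_append_dropWhile]]
        rw [List.foldl_cons, List.foldl_append]
        have hstep : stepB (d, r, 0, false) '1' = (d, r + 1, 0, true) := by
          simp [stepB]
        rw [hstep, foldB_ones _ hones d (r + 1)]
      have hih := ih hbin' hhd d (r + 1)
      refine ⟨?_, ?_⟩
      · rw [hfold, hih.1]
        simp [scanA]
      · rw [hfold, hih.2]
        simp only [scanA, reduceIte]
        ring
  | case3 rest prev1 h rest' ih =>
      intro d r
      -- the zero run and its remainder
      have hzs : ('0' :: rest).takeWhile (· = '0') = '0' :: rest.takeWhile (· = '0') := by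
        simp [List.takeWhile_cons]
      have hrest' : ('0' :: rest).dropWhile (· = '0') = rest.dropWhile (· = '0') := by
        simp [List.dropWhile_cons]
      rw [show rest' = rest.dropWhile (· = '0') from hrest'] at ih
      have hzeros : ∀ c ∈ ('0' :: rest).takeWhile (· = '0'), c ≠ '1' := by
        intro c hc
        have : c = '0' := by simpa using List.mem_takeWhile_imp hc
        simp [this]
      have hbin' : ∀ c ∈ rest.dropWhile (· = '0'), c = '0' ∨ c = '1' := by
        intro c hc
        exact hbin c (List.mem_cons_of_mem _ ((List.dropWhile_sublist _).mem hc))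
      have hhd0 : (rest.dropWhile (· = '0')).head? ≠ some '0' := by
        intro hh
        have := head?_dropWhile_ne (· = '0') rest '0' hh
        simp at this
      have glen : (0 : Int) + (('0' :: rest).takeWhile (· = '0')).length
          = ((('0' :: rest).takeWhile (· = '0')).length : Int) := by omega
      have hglen0 : ((('0' :: rest).takeWhile (· = '0')).length : Int) ≠ 0 := by
        rw [hzs]; simp only [List.length_cons]; push_cast; omega
      -- fold over the whole list = fold over the zero run, then the remainder
      have hfold : List.foldl stepB (d, r, 0, prev1) ('0' :: rest)
          = List.foldl stepB
              (d, r, ((('0' :: rest).takeWhile (· = '0')).length : Int), prev1)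
              (rest.dropWhile (· = '0')) := by
        conv_lhs => rw [show ('0' :: rest)
            = ('0' :: rest).takeWhile (· = '0') ++ ('0' :: rest).dropWhile (· = '0') by
          rw [List.takeWhile_append_dropWhile]]
        rw [List.foldl_append, foldB_zeros _ hzeros d r 0 prev1, glen, hrest']
      have hhop := foldB_hop (rest.dropWhile (· = '0')) hhd0 hbin' d r
        ((('0' :: rest).takeWhile (· = '0')).length : Int) prev1 hglen0
      have hih := ih hbin' (by simp) (if prev1 && ((rest.dropWhile (· = '0')).head? == some '1')
          then d.modify ((('0' :: rest).takeWhile (· = '0')).length : Int) 0 (· + 1) else d) r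
      -- scanA on this list
      have hscan : scanA ('0' :: rest) prev1
          = (if prev1 && ((rest.dropWhile (· = '0')).head? == some '1')
               then ((('0' :: rest).takeWhile (· = '0')).length : Int)
                      :: (scanA (rest.dropWhile (· = '0')) false).1
               else (scanA (rest.dropWhile (· = '0')) false).1,
             (scanA (rest.dropWhile (· = '0')) false).2) := by
        conv_lhs => rw [scanA]
        simp [hrest']
      refine ⟨?_, ?_⟩
      · rw [hfold, hhop.1, hih.1, hscan]
        cases hi : prev1 && ((rest.dropWhile (· = '0')).head? == some '1') <;>
          simp [hi, List.foldl_cons]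
      · rw [hfold, hhop.2, hih.2, hscan]
  | case4 c rest prev1 h1 h2 ih =>
      intro d r
      rcases hbin c (by simp) with h | h
      · exact absurd h h2
      · exact absurd h h1

-- every collected gap length lies in [1, length of the scanned list]
theorem scanA_gap_bounds (L : List Char) (p : Bool) :
    ∀ g ∈ (scanA L p).1, 1 ≤ g ∧ g ≤ (L.length : Int) := by
  induction L, p using scanA.induct with
  | case1 p => simp [scanA]
  | case2 rest prev1 ih =>
      intro g hg
      simp only [scanA, reduceIte] at hg
      have hb := ih g hg
      have hlen : (rest.dropWhile (· = '1')).length ≤ rest.length :=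
        List.length_dropWhile_le _ _
      simp only [List.length_cons]
      omega
  | case3 rest prev1 h rest' ih =>
      intro g hg
      simp only [scanA, reduceIte, reduceDIte] at hg
      simp only [List.dropWhile_cons, List.takeWhile_cons, decide_true, reduceIte] at hg ih
      have hzlen : (rest.takeWhile (· = '0')).length ≤ rest.length :=
        (List.takeWhile_sublist _).length_le
      have hrlen : (rest.dropWhile (· = '0')).length ≤ rest.length :=
        List.length_dropWhile_le _ _
      have hmem : g = ((rest.takeWhile (· = '0')).length : Int) + 1
          ∨ g ∈ (scanA (rest.dropWhile (· = '0')) false).1 := by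
        cases hi : prev1 && ((rest.dropWhile (· = '0')).head? == some '1') <;>
          simp [hi] at hg
        · tauto
        · tauto
      rcases hmem with h1 | h2
      · subst h1
        simp only [List.length_cons]
        constructor
        · omega
        · have : ((rest.takeWhile (· = '0')).length : Int) ≤ (rest.length : Int) := by
            exact_mod_cast hzlen
          omega
      · have hb := ih g h2
        have hre : rest' = List.dropWhile (fun x => decide (x = '0')) rest := rfl
        rw [hre] at hb
        simp only [List.length_cons] at *
        omega
  | case4 c rest prev1 h1 h2 ih =>
      intro g hg
      simp only [scanA, reduceIte, if_neg h1, reduceDIte, dif_neg h2] at hg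
      have hb := ih g hg
      simp only [List.length_cons]
      omega

-- gloop keeps kUse + used constant
theorem gloop_inv (gs : List Int) : ∀ kUse merges used,
    (gloop gs kUse merges used).1 + (gloop gs kUse merges used).2.2 = kUse + used := by
  induction gs with
  | nil => intro kUse merges used; simp [gloop]
  | cons g gs ih =>
      intro kUse merges used
      rw [gloop]
      split
      · have := ih (kUse - g) (merges + 1) (used + g); omega
      · simp

-- merges-only view of A's greedy loop
def mA : List Int → Int → Int
  | [], _ => 0
  | g :: gs, b => if b ≥ g then 1 + mA gs (b - g) else 0

theorem gloop_merges (gs : List Int) : ∀ kUse merges used,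
    (gloop gs kUse merges used).2.1 = merges + mA gs kUse := by
  induction gs with
  | nil => intro kUse merges used; simp [gloop, mA]
  | cons g gs ih =>
      intro kUse merges used
      rw [gloop, mA]
      split
      · rw [ih]; ring
      · simp

-- the canonical ascending arrangement of the gaps, block by block
def canon (f : Int → Nat) (Ls : List Int) : List Int :=
  Ls.flatMap fun l => List.replicate (f l) l

theorem count_canon (f : Int → Nat) (x : Int) :
    ∀ (Ls : List Int), Ls.Nodup → (canon f Ls).count x = if x ∈ Ls then f x else 0 := by
  intro Ls
  induction Ls with
  | nil => simp [canon]
  | cons l Ls ih =>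
      intro hnd
      have hnd' := (List.nodup_cons.mp hnd)
      simp only [canon, List.flatMap_cons, List.count_append, List.count_replicate]
      have hih := ih hnd'.2
      unfold canon at hih
      rw [hih]
      by_cases hx : x = l
      · subst hx
        simp [hnd'.1]
      · simp [hx, Ne.symm hx]

theorem mem_canon {f : Int → Nat} {Ls : List Int} {x : Int} (h : x ∈ canon f Ls) : x ∈ Ls := by
  simp only [canon, List.mem_flatMap] at h
  obtain ⟨l, hl, hx⟩ := h
  rw [List.eq_of_mem_replicate hx]
  exact hl

theorem pairwise_canon (f : Int → Nat) :
    ∀ (Ls : List Int), Ls.Pairwise (· < ·) → (canon f Ls).Pairwise (· ≤ ·) := by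
  intro Ls
  induction Ls with
  | nil => simp [canon]
  | cons l Ls ih =>
      intro hp
      rw [List.pairwise_cons] at hp
      simp only [canon, List.flatMap_cons]
      refine List.pairwise_append.mpr ⟨?_, ?_, ?_⟩
      · exact List.pairwise_replicate.mpr (Or.inr le_rfl)
      · exact ih hp.2
      · intro a ha b hb
        rw [List.eq_of_mem_replicate ha]
        exact le_of_lt (hp.1 b (mem_canon hb))

-- an affordable bucket is consumed whole
theorem mA_replicate_all (l : Int) (hl : 1 ≤ l) :
    ∀ (c : Nat) (rest : List Int) (b : Int), (c : Int) * l ≤ b →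
      mA (List.replicate c l ++ rest) b = c + mA rest (b - c * l) := by
  intro c
  induction c with
  | zero => intro rest b h; simp [mA]
  | succ c ih =>
      intro rest b h
      have hb : b ≥ l := by push_cast at h; nlinarith [Int.natCast_nonneg c]
      simp only [List.replicate_succ, List.cons_append, mA, hb, if_pos (by omega : b ≥ l)]
      rw [ih rest (b - l) (by push_cast at h ⊢; linarith)]
      push_cast
      ring_nf

-- an unaffordable bucket stops the walk after exactly b / l merges
theorem mA_replicate_part (l : Int) (hl : 0 < l) :
    ∀ (c : Nat) (rest : List Int) (b : Int), 0 ≤ b → b / l < (c : Int) →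
      mA (List.replicate c l ++ rest) b = b / l := by
  intro c
  induction c with
  | zero =>
      intro rest b hb h
      have := Int.ediv_nonneg hb (by omega : (0:Int) ≤ l)
      simp at h
      omega
  | succ c ih =>
      intro rest b hb h
      by_cases hbl : b ≥ l
      · simp only [List.replicate_succ, List.cons_append, mA, if_pos hbl]
        have hdiv : (b - l) / l = b / l - 1 := by
          have := Int.add_mul_ediv_right b (-1) (by omega : l ≠ 0)
          simpa [sub_eq_add_neg, neg_mul] using this
        by_cases hc : (b - l) / l < (c : Int)
        · rw [ih rest (b - l) (by
            have : l ≤ b := hbl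
            omega) hc, hdiv]
          omega
        · exfalso
          push_cast at h
          omega
      · push_neg at hbl
        have h0 : b / l = 0 := Int.ediv_eq_zero_of_lt hb hbl
        cases c' : (c + 1) with
        | zero => omega
        | succ m =>
          simp only [List.replicate_succ, List.cons_append, mA, if_neg (by omega : ¬ b ≥ l)]
          omega

-- the bucket walk equals the greedy walk over the canonical arrangement
theorem bloop_eq_mA (cnt : PySem.Dict Int Int) (f : Int → Nat)
    (hcnt : ∀ l, cnt.getD l 0 = (f l : Int)) :
    ∀ (Ls : List Int), (∀ l ∈ Ls, 1 ≤ l) → ∀ (b m : Int),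
      bloop cnt Ls b m = m + mA (canon f Ls) b := by
  intro Ls
  induction Ls with
  | nil => intro _ b m; simp [bloop, canon, mA]
  | cons l Ls ih =>
      intro hpos b m
      have hl : 1 ≤ l := hpos l (by simp)
      have hLs : ∀ l' ∈ Ls, 1 ≤ l' := fun l' h => hpos l' (by simp [h])
      rw [bloop]
      simp only [hcnt l]
      by_cases hc0 : (f l : Int) = 0
      · have hf0 : f l = 0 := by exact_mod_cast hc0
        rw [if_pos hc0, ih hLs b m]
        simp [canon, hf0]
      · rw [if_neg hc0]
        have hfpos : 0 < f l := by
          rcases Nat.eq_zero_or_pos (f l) with h | h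
          · exact absurd (by exact_mod_cast h) hc0
          · exact h
        by_cases hb : b < l
        · rw [if_pos hb]
          have : canon f (l :: Ls) = l :: (List.replicate (f l - 1) l ++ canon f Ls) := by
            simp only [canon, List.flatMap_cons]
            cases hf : f l with
            | zero => omega
            | succ m' => simp [List.replicate_succ]
          rw [this, mA, if_neg (by omega)]
          ring
        · rw [if_neg hb]
          push_neg at hb
          have hbpos : 0 ≤ b := le_trans (by omega) hb
          have hfd : PySem.Int.floordiv b l = b / l :=
            PySem.Int.floordiv_eq_ediv_of_pos (by omega)
          rw [hfd]
          simp only [canon, List.flatMap_cons]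
          by_cases ht : min ((f l : Int)) (b / l) < (f l : Int)
          · rw [if_pos ht]
            have hdl : b / l < (f l : Int) := by omega
            rw [show (List.replicate (f l) l ++ Ls.flatMap fun l' => List.replicate (f l') l')
                = List.replicate (f l) l ++ canon f Ls from rfl]
            rw [mA_replicate_part l (by omega) (f l) (canon f Ls) b hbpos hdl]
            omega
          · rw [if_neg ht]
            push_neg at ht
            have hmin : min ((f l : Int)) (b / l) = (f l : Int) := by omega
            have hle : (f l : Int) ≤ b / l := by omega
            have hmul : (f l : Int) * l ≤ b :=
              (Int.le_ediv_iff_mul_le (by omega : (0:Int) < l)).mp hle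
            rw [hmin]
            rw [show (List.replicate (f l) l ++ Ls.flatMap fun l' => List.replicate (f l') l')
                = List.replicate (f l) l ++ canon f Ls from rfl]
            rw [mA_replicate_all l hl (f l) (canon f Ls) b hmul]
            rw [ih hLs (b - (f l : Int) * l) (m + (f l : Int))]
            ring

-- sorting the gap list IS the canonical bucket arrangement
theorem sorted_gaps_eq_canon (L : List Char) :
    PySem.List.sorted (scanA L false).1 (fun x => x) false
      = canon (fun l => (scanA L false).1.count l) (PySem.List.pyRange 1 ((L.length : Int) + 1) 1) := by
  apply PySem.List.sorted_id_eq_of_perm_of_pairwise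
  · apply List.perm_iff_count.mpr
    intro x
    rw [count_canon _ x _ (PySem.List.nodup_pyRange_one 1 ((L.length : Int) + 1))]
    by_cases hx : x ∈ PySem.List.pyRange 1 ((L.length : Int) + 1) 1
    · simp [hx]
    · rw [if_neg hx]
      symm
      rw [List.count_eq_zero]
      intro hmem
      exact hx ((PySem.List.mem_pyRange_one).mpr
        ⟨(scanA_gap_bounds L false x hmem).1, by
          have := (scanA_gap_bounds L false x hmem).2; omega⟩)
  · exact pairwise_canon _ _ (PySem.List.pairwise_lt_pyRange_one 1 ((L.length : Int) + 1))

-- ===== VERDICT (by name: the statement is the Claim_ definition above) =====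
theorem getMaxEarnings_spec : Claim_equal_getMaxEarnings := by
  intro schedule k fixedPay bonus _ hpre
  have hbin : ∀ c ∈ schedule.toList, c = '0' ∨ c = '1' := by
    intro c hc
    simpa using (List.all_eq_true.mp hpre) c hc
  unfold Spec_getMaxEarnings getMaxEarnings getMaxEarnings_alt
  dsimp only
  split_ifs with h0 h1
  · rfl
  · rfl
  · -- main branch: rewrite B's side into A's vocabulary
    have hfold := foldB_eq schedule.toList false hbin (by simp) PySem.Dict.empty 0
    have hcnt : ∀ l, (schedule.toList.foldl stepB (PySem.Dict.empty, 0, 0, false)).1.getD l 0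
        = (((scanA schedule.toList false).1.count l : Nat) : Int) := by
      intro l
      rw [hfold.1]
      simp [PySem.Dict.getD_foldl_modify_add_one]
    have hruns : (schedule.toList.foldl stepB (PySem.Dict.empty, 0, 0, false)).2.1
        = (scanA schedule.toList false).2 := by
      rw [hfold.2]; ring
    have hmerge : bloop (schedule.toList.foldl stepB (PySem.Dict.empty, 0, 0, false)).1
          (PySem.List.pyRange 1 ((schedule.toList.length : Int) + 1) 1)
          (min k (schedule.toList.count '0' : Int)) 0
        = (gloop (PySem.List.sorted (scanA schedule.toList false).1 (fun x => x) false)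
            (min k (schedule.toList.count '0' : Int)) 0 0).2.1 := by
      rw [bloop_eq_mA _ _ hcnt _ (fun l hl => ((PySem.List.mem_pyRange_one).mp hl).1) _ 0,
          gloop_merges, sorted_gaps_eq_canon]
    have hinv := gloop_inv (PySem.List.sorted (scanA schedule.toList false).1 (fun x => x) false)
        (min k (schedule.toList.count '0' : Int)) 0 0
    have hused : (gloop (PySem.List.sorted (scanA schedule.toList false).1 (fun x => x) false)
            (min k (schedule.toList.count '0' : Int)) 0 0).2.2
          + min (gloop (PySem.List.sorted (scanA schedule.toList false).1 (fun x => x) false)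
              (min k (schedule.toList.count '0' : Int)) 0 0).1
            ((schedule.toList.count '0' : Int)
              - (gloop (PySem.List.sorted (scanA schedule.toList false).1 (fun x => x) false)
                  (min k (schedule.toList.count '0' : Int)) 0 0).2.2)
        = min k (schedule.toList.count '0' : Int) := by omega
    rw [hmerge, hruns, hused]
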